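-- pv_equiv track=rewrite | github.com/spegesilden/projecteuler | e33/DigitCancelling.py | isCan
-- ===== SOURCE A (Python) =====
-- def red(p1, q1):
--     divpq1 = []
--     m = max(p1, q1)
--
--     for i in range(2, m):
--         if p1 % i == 0 and q1 % i == 0:
--             divpq1.append(i)
--
--     p1n = p1
--     q1n = q1
--
--     for i in range(len(divpq1)):
--         d = divpq1[len(divpq1)-1-i]
--         if p1n % d == 0 and q1n % d == 0:
--             p1n = int(p1n / d)
--             q1n = int(q1n / d)
--
--     return [p1n, q1n]
--
-- def isCan(p, q):
--     if p % 10 == 0 and q % 10 == 0: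
--         return False
--
--     digitsp = [c for c in str(p)]
--     digitsq = [c for c in str(q)]
--
--     n = 0
--     m = 0
--     contains = False
--
--     #if digitsp[1] == digitsq[0]:
--     #    contains = True
--     for i in range(len(digitsp)):
--         for j in range(len(digitsq)):
--             if digitsp[i] == digitsq[j]:
--                 contains = True
--                 n = i
--                 m = j
--
--     if contains:
--         n = (n + 1) % 2
--         m = (m + 1) % 2
--
--         pair = [int(digitsp[n]), int(digitsq[m])]
--         red1 = red(p, q)
--
--         pnew = pair[0]
--         qnew = pair[1]
--
--         red2 = red(pnew, qnew)
--
--         if red1[0] == red2[0] and red1[1] == red2[1]: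
--             return True
--
--     return False
-- ===== SOURCE B (Python) =====
-- import math
--
-- def _common_divs_desc(p, q, m):
--     # common divisors of p and q that lie in [2, m) are exactly the divisors of
--     # gcd(p, q) in that window; find them by trial division up to sqrt(gcd)
--     g = math.gcd(p, q)
--     divs = set()
--     d = 1
--     while d * d <= g:
--         if g % d == 0:
--             divs.add(d)
--             divs.add(g // d)
--         d += 1
--     return sorted((x for x in divs if 2 <= x < m), reverse=True)
--
-- def _reduce(p1, q1):
--     p1n, q1n = p1, q1
--     for d in _common_divs_desc(p1, q1, max(p1, q1)):
--         if p1n % d == 0 and q1n % d == 0: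
--             p1n //= d
--             q1n //= d
--     return [p1n, q1n]
--
-- def isCan(p, q):
--     if p % 10 == 0 and q % 10 == 0:
--         return False
--     sp, sq = str(p), str(q)
--     # last matching pair (i, j): scan both strings from the end, first hit wins
--     for i in range(len(sp) - 1, -1, -1):
--         for j in range(len(sq) - 1, -1, -1):
--             if sp[i] == sq[j]:
--                 n = (i + 1) % 2
--                 m = (j + 1) % 2
--                 return _reduce(p, q) == _reduce(int(sp[n]), int(sq[m]))
--     return False
-- ===== Notes on version B (the rewrite author's own statement) =====
-- stated objective: faster
-- what changed: The O(max(p,q)) scan for common divisors is replaced by trial division up to sqrt(gcd(p,q)) (common divisors are exactly the divisors of the gcd), and the last-matching-digit search becomes an early-exit reverse scan instead of a full forward overwrite loop.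
import Mathlib
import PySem

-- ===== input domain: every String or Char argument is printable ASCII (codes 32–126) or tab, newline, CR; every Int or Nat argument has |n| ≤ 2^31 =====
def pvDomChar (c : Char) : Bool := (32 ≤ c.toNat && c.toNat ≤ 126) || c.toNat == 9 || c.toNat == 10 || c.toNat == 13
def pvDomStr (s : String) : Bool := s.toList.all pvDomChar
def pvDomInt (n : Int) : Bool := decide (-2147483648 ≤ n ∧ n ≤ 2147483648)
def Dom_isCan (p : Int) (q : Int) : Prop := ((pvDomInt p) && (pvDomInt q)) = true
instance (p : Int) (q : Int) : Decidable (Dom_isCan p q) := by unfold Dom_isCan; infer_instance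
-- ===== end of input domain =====

-- B replaces A's O(max(p,q)) common-divisor scan by trial division up to sqrt(gcd(p,q))
-- and A's full forward overwrite search for the last matching digit pair by an
-- early-exit reverse scan; equal return values wherever the Python A returns (Pre_).

-- ===== PORT A =====

def redA (p1 : Int) (q1 : Int) : Int × Int :=
  let m := max p1 q1
  let divpq1 := (PySem.List.pyRange 2 m 1).foldl
    (fun acc i => if PySem.Int.mod p1 i == 0 && PySem.Int.mod q1 i == 0 then acc ++ [i] else acc)
    ([] : List Int)
  (PySem.List.pyRange 0 (PySem.List.len divpq1) 1).foldl
    (fun st i =>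
      let d := PySem.List.pyGetD divpq1 (PySem.List.len divpq1 - 1 - i) 0
      if PySem.Int.mod st.1 d == 0 && PySem.Int.mod st.2 d == 0 then
        -- int(p1n / d): exact, since d divides p1n and q1n here (guarded by the mod test)
        (PySem.Int.truncdiv st.1 d, PySem.Int.truncdiv st.2 d)
      else st)
    (p1, q1)

def isCan (p : Int) (q : Int) : Bool :=
  if PySem.Int.mod p 10 == 0 && PySem.Int.mod q 10 == 0 then false
  else
    let digitsp := PySem.Int.toChars p
    let digitsq := PySem.Int.toChars q
    let st := (PySem.List.pyRange 0 (PySem.List.len digitsp) 1).foldl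
      (fun st i => (PySem.List.pyRange 0 (PySem.List.len digitsq) 1).foldl
        (fun st j =>
          if PySem.List.pyGetD digitsp i ' ' == PySem.List.pyGetD digitsq j ' ' then (true, i, j)
          else st) st)
      ((false, 0, 0) : Bool × Int × Int)
    if st.1 then
      let n := PySem.Int.mod (st.2.1 + 1) 2
      let m := PySem.Int.mod (st.2.2 + 1) 2
      match PySem.List.pyGet? digitsp n, PySem.List.pyGet? digitsq m with
      | some cp, some cq =>
        match PySem.Int.ofChars? [cp], PySem.Int.ofChars? [cq] with
        | some pnew, some qnew =>
          let red1 := redA p q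
          let red2 := redA pnew qnew
          if red1.1 == red2.1 && red1.2 == red2.2 then true else false
        | _, _ => false  -- int('-') raises ValueError in Python: excluded by Pre_isCan
      | _, _ => false    -- index 1 into a 1-character string raises IndexError: excluded by Pre_isCan
    else false

-- ===== PORT B =====

-- while d * d <= g: collect d and g // d when they divide g
def trialDivs (g : Int) (d : Int) (divs : List Int) : List Int :=
  if h : d * d ≤ g then
    trialDivs g (d + 1)
      (if PySem.Int.mod g d == 0 then
        PySem.Set.add (PySem.Set.add divs d) (PySem.Int.floordiv g d)
      else divs)
  else divs
termination_by (g + 1 - d).toNat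
decreasing_by
  have hdg : d ≤ g := by
    rcases (by omega : d ≤ 0 ∨ 0 < d) with h0 | h1
    · nlinarith [mul_self_nonneg d]
    · nlinarith
  omega

def commonDivsDesc (p : Int) (q : Int) (m : Int) : List Int :=
  let g : Int := (Int.gcd p q : Int)   -- math.gcd(p, q)
  let divs := trialDivs g 1 []
  PySem.List.sorted (divs.filter (fun x => decide (2 ≤ x) && decide (x < m))) (fun x => x) true

def reduceB (p1 : Int) (q1 : Int) : Int × Int :=
  (commonDivsDesc p1 q1 (max p1 q1)).foldl
    (fun st d =>
      if PySem.Int.mod st.1 d == 0 && PySem.Int.mod st.2 d == 0 then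
        (PySem.Int.floordiv st.1 d, PySem.Int.floordiv st.2 d)
      else st)
    (p1, q1)

-- inner 'for j in range(len(sq)-1, -1, -1)' with early return
def revFindJ (c : Char) (sq : List Char) (js : List Int) : Option Int :=
  match js with
  | [] => none
  | j :: rest => if c == PySem.List.pyGetD sq j ' ' then some j else revFindJ c sq rest

-- outer 'for i in range(len(sp)-1, -1, -1)' with early return
def revScan (sp : List Char) (sq : List Char) (is : List Int) : Option (Int × Int) :=
  match is with
  | [] => none
  | i :: rest =>
    match revFindJ (PySem.List.pyGetD sp i ' ') sq
        (PySem.List.pyRange (PySem.List.len sq - 1) (-1) (-1)) with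
    | some j => some (i, j)
    | none => revScan sp sq rest

def isCan_alt (p : Int) (q : Int) : Bool :=
  if PySem.Int.mod p 10 == 0 && PySem.Int.mod q 10 == 0 then false
  else
    let sp := PySem.Int.toChars p
    let sq := PySem.Int.toChars q
    match revScan sp sq (PySem.List.pyRange (PySem.List.len sp - 1) (-1) (-1)) with
    | none => false
    | some (i, j) =>
      let n := PySem.Int.mod (i + 1) 2
      let m := PySem.Int.mod (j + 1) 2
      let red1 := reduceB p q
      match PySem.List.pyGet? sp n with
      | none => true    -- IndexError in Python: excluded by Pre_isCan (value deliberately differs from port A's)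
      | some cp =>
        match PySem.List.pyGet? sq m with
        | none => true
        | some cq =>
          match PySem.Int.ofChars? [cp] with
          | none => true  -- ValueError in Python: excluded by Pre_isCan (value deliberately differs from port A's)
          | some pnew =>
            match PySem.Int.ofChars? [cq] with
            | none => true
            | some qnew => decide (red1 = reduceB pnew qnew)

-- ===== PRECONDITION & SPEC =====

-- Pre_isCan excludes exactly the inputs on which the Python A raises: when the last
-- matching character pair (i, j) of str(p), str(q) flips to an index outside a
-- 1-character string (IndexError) or onto a sign character, int('-') (ValueError).
def Pre_isCan (p : Int) (q : Int) : Prop :=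
  (PySem.Int.mod p 10 = 0 ∧ PySem.Int.mod q 10 = 0) ∨
  (∀ i : Nat, i < (PySem.Int.toChars p).length →
   ∀ j : Nat, j < (PySem.Int.toChars q).length →
    ((PySem.Int.toChars p).getD i ' ' = (PySem.Int.toChars q).getD j ' ' ∧
     (∀ i' : Nat, i' < (PySem.Int.toChars p).length → i < i' →
        ∀ j' : Nat, j' < (PySem.Int.toChars q).length →
          (PySem.Int.toChars p).getD i' ' ' ≠ (PySem.Int.toChars q).getD j' ' ') ∧
     (∀ j' : Nat, j' < (PySem.Int.toChars q).length → j < j' →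
        (PySem.Int.toChars p).getD i ' ' ≠ (PySem.Int.toChars q).getD j' ' ')) →
    ((i + 1) % 2 < (PySem.Int.toChars p).length ∧
     (j + 1) % 2 < (PySem.Int.toChars q).length ∧
     (PySem.Int.ofChars? [(PySem.Int.toChars p).getD ((i + 1) % 2) ' ']).isSome = true ∧
     (PySem.Int.ofChars? [(PySem.Int.toChars q).getD ((j + 1) % 2) ' ']).isSome = true))
instance (p : Int) (q : Int) : Decidable (Pre_isCan p q) := by
  unfold Pre_isCan
  exact @instDecidableOr _ _ inferInstance
    (@Nat.decidableBallLT _ _ (fun i hi => @Nat.decidableBallLT _ _ (fun j hj => inferInstance)))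

def pvWitness_isCan : Int × Int := (16, 64)

def Spec_isCan (p : Int) (q : Int) (out : Bool) : Prop := out = isCan_alt p q
instance (p : Int) (q : Int) (out : Bool) : Decidable (Spec_isCan p q out) := by unfold Spec_isCan; infer_instance

-- ===== CLAIM (what is proved, stated in full; the proofs are below) =====
def Claim_equal_isCan : Prop := ∀ (p : Int) (q : Int), Dom_isCan p q → Pre_isCan p q → Spec_isCan p q (isCan p q)

-- ===== LEMMAS AND PROOFS =====

theorem trial_inv (g : Int) (x : Int) : ∀ (d : Int) (s : List Int), 1 ≤ d →
    (x ∈ trialDivs g d s ↔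
      x ∈ s ∨ ∃ e : Int, d ≤ e ∧ e * e ≤ g ∧ e ∣ g ∧ (x = e ∨ x = PySem.Int.floordiv g e)) := by
  have H : ∀ (k : Nat) (d : Int) (s : List Int), 1 ≤ d → (g + 1 - d).toNat = k →
      (x ∈ trialDivs g d s ↔
        x ∈ s ∨ ∃ e : Int, d ≤ e ∧ e * e ≤ g ∧ e ∣ g ∧ (x = e ∨ x = PySem.Int.floordiv g e)) := by
    intro k
    induction k using Nat.strong_induction_on with
    | _ k ih =>
      intro d s hd hk
      rw [trialDivs]
      by_cases hguard : d * d ≤ g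
      · have hdg : d ≤ g := by nlinarith
        rw [dif_pos hguard,
          ih ((g + 1 - (d + 1)).toNat) (by omega) (d + 1) _ (by omega) rfl]
        by_cases hm : PySem.Int.mod g d = 0
        · have hdvd : d ∣ g := (PySem.Int.mod_eq_zero_iff_dvd g d).mp hm
          rw [if_pos (by simpa using hm)]
          constructor
          · rintro (hmem | ⟨e, he1, he2, he3, he4⟩)
            · rcases (PySem.Set.mem_add _ _ _).mp hmem with hmem' | heq
              · rcases (PySem.Set.mem_add _ _ _).mp hmem' with hs | heq
                · exact Or.inl hs
                · exact Or.inr ⟨d, le_refl d, hguard, hdvd, Or.inl heq⟩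
              · exact Or.inr ⟨d, le_refl d, hguard, hdvd, Or.inr heq⟩
            · exact Or.inr ⟨e, by omega, he2, he3, he4⟩
          · rintro (hs | ⟨e, he1, he2, he3, he4⟩)
            · exact Or.inl ((PySem.Set.mem_add _ _ _).mpr
                (Or.inl ((PySem.Set.mem_add _ _ _).mpr (Or.inl hs))))
            · rcases (by omega : e = d ∨ d + 1 ≤ e) with rfl | he5
              · rcases he4 with rfl | rfl
                · exact Or.inl ((PySem.Set.mem_add _ _ _).mpr
                    (Or.inl ((PySem.Set.mem_add _ _ _).mpr (Or.inr rfl))))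
                · exact Or.inl ((PySem.Set.mem_add _ _ _).mpr (Or.inr rfl))
              · exact Or.inr ⟨e, he5, he2, he3, he4⟩
        · have hndvd : ¬ d ∣ g := fun hc => hm ((PySem.Int.mod_eq_zero_iff_dvd g d).mpr hc)
          rw [if_neg (by simpa using hm)]
          constructor
          · rintro (hs | ⟨e, he1, he2, he3, he4⟩)
            · exact Or.inl hs
            · exact Or.inr ⟨e, by omega, he2, he3, he4⟩
          · rintro (hs | ⟨e, he1, he2, he3, he4⟩)
            · exact Or.inl hs
            · rcases (by omega : e = d ∨ d + 1 ≤ e) with rfl | he5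
              · exact absurd he3 hndvd
              · exact Or.inr ⟨e, he5, he2, he3, he4⟩
      · rw [dif_neg hguard]
        constructor
        · exact Or.inl
        · rintro (hs | ⟨e, he1, he2, he3, he4⟩)
          · exact hs
          · exact absurd he2 (by nlinarith)
  intro d s hd
  exact H (g + 1 - d).toNat d s hd rfl

theorem trial_mem (g : Int) (hg : 1 ≤ g) (x : Int) :
    x ∈ trialDivs g 1 [] ↔ 1 ≤ x ∧ x ∣ g := by
  rw [trial_inv g x 1 [] (le_refl 1)]
  simp only [List.not_mem_nil, false_or]
  constructor
  · rintro ⟨e, he1, he2, he3, he4⟩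
    obtain ⟨c, hc⟩ := he3
    have hc1 : 1 ≤ c := by nlinarith
    have hfd : PySem.Int.floordiv g e = c := by
      rw [PySem.Int.floordiv_eq_ediv_of_pos (by omega : (0 : Int) < e), hc,
        Int.mul_ediv_cancel_left c (by omega : e ≠ 0)]
    rcases he4 with rfl | rfl
    · exact ⟨he1, ⟨c, hc⟩⟩
    · refine ⟨?_, ⟨e, ?_⟩⟩
      · rw [hfd]; omega
      · rw [hfd, hc]; ring
  · rintro ⟨hx1, hx2⟩
    obtain ⟨c, hc⟩ := hx2
    have hc1 : 1 ≤ c := by nlinarith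
    by_cases hxx : x * x ≤ g
    · exact ⟨x, hx1, hxx, ⟨c, hc⟩, Or.inl rfl⟩
    · have hcx : c < x := by nlinarith
      refine ⟨c, hc1, by nlinarith, ⟨x, by rw [hc]; ring⟩, Or.inr ?_⟩
      rw [PySem.Int.floordiv_eq_ediv_of_pos (by omega : (0 : Int) < c), hc,
        mul_comm, Int.mul_ediv_cancel_left x (by omega : c ≠ 0)]

theorem trial_nodup (g : Int) : ∀ (d : Int) (s : List Int), s.Nodup → (trialDivs g d s).Nodup := by
  have H : ∀ (k : Nat) (d : Int) (s : List Int), (g + 1 - d).toNat = k → s.Nodup →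
      (trialDivs g d s).Nodup := by
    intro k
    induction k using Nat.strong_induction_on with
    | _ k ih =>
      intro d s hk hs
      rw [trialDivs]
      by_cases hguard : d * d ≤ g
      · have hdg : d ≤ g := by
          rcases (by omega : d ≤ 0 ∨ 0 < d) with h0 | h1
          · nlinarith [mul_self_nonneg d]
          · nlinarith
        rw [dif_pos hguard]
        refine ih ((g + 1 - (d + 1)).toNat) (by omega) (d + 1) _ rfl ?_
        by_cases hm : PySem.Int.mod g d = 0
        · rw [if_pos (by simpa using hm)]
          exact PySem.Set.nodup_add _ _ (PySem.Set.nodup_add _ _ hs)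
        · rw [if_neg (by simpa using hm)]
          exact hs
      · rw [dif_neg hguard]; exact hs
  intro d s hs
  exact H (g + 1 - d).toNat d s rfl hs

theorem dvd_gcd_iff' (x p q : Int) (hx : 0 < x) :
    x ∣ ((Int.gcd p q : Nat) : Int) ↔ x ∣ p ∧ x ∣ q := by
  constructor
  · intro h; exact ⟨h.trans (Int.gcd_dvd_left p q), h.trans (Int.gcd_dvd_right p q)⟩
  · rintro ⟨h1, h2⟩
    have hx' : x = (x.toNat : Int) := by omega
    rw [hx'] at h1 h2 ⊢
    exact Int.natCast_dvd_natCast.mpr (Int.dvd_gcd h1 h2)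

theorem foldl_rev_index {α β : Type} (xs : List α) (d0 : α) (f : β → α → β) (init : β) :
    (PySem.List.pyRange 0 ((xs.length : Int)) 1).foldl
      (fun st i => f st (PySem.List.pyGetD xs ((xs.length : Int) - 1 - i) d0)) init
    = xs.reverse.foldl f init := by
  have hmap : (PySem.List.pyRange 0 ((xs.length : Int)) 1).map
      (fun i => PySem.List.pyGetD xs ((xs.length : Int) - 1 - i) d0) = xs.reverse := by
    apply List.ext_getElem
    · simp [PySem.List.length_pyRange_one]
    · intro k h1 h2
      rw [List.getElem_map, PySem.List.getElem_pyRange_one _ _ k (by simpa using h1),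
        List.getElem_reverse]
      have hk : k < xs.length := by
        simpa [PySem.List.length_pyRange_one] using h1
      rw [show (0 : Int) + (k : Int) = (k : Int) by ring,
        show ((xs.length : Int)) - 1 - (k : Int) = ((xs.length - 1 - k : Nat) : Int) by omega,
        PySem.List.pyGetD_natCast, List.getD_eq_getElem _ _ (by omega)]
  rw [← hmap, List.foldl_map]

theorem list_eq (p1 q1 : Int) :
    PySem.List.sorted
      ((trialDivs ((Int.gcd p1 q1 : Nat) : Int) 1 []).filter
        (fun x => decide (2 ≤ x) && decide (x < max p1 q1))) (fun x => x) true
    = ((PySem.List.pyRange 2 (max p1 q1) 1).filter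
        (fun i => PySem.Int.mod p1 i == 0 && PySem.Int.mod q1 i == 0)).reverse := by
  apply PySem.List.sorted_rev_eq_of_perm_of_pairwise_gt
  · rw [List.perm_ext_iff_of_nodup]
    · intro a
      simp only [List.mem_reverse, List.mem_filter, PySem.List.mem_pyRange_one,
        Bool.and_eq_true, decide_eq_true_eq, beq_iff_eq]
      constructor
      · rintro ⟨⟨h2, hm⟩, hp, hq⟩
        have hdp : a ∣ p1 := (PySem.Int.mod_eq_zero_iff_dvd p1 a).mp hp
        have hdq : a ∣ q1 := (PySem.Int.mod_eq_zero_iff_dvd q1 a).mp hq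
        have hg1 : 1 ≤ ((Int.gcd p1 q1 : Nat) : Int) := by
          rcases Nat.eq_zero_or_pos (Int.gcd p1 q1) with h0 | h1
          · obtain ⟨rfl, rfl⟩ := Int.gcd_eq_zero_iff.mp h0
            simp at hm
            omega
          · exact_mod_cast h1
        refine ⟨(trial_mem _ hg1 a).mpr ⟨by omega, ?_⟩, h2, hm⟩
        exact (dvd_gcd_iff' a p1 q1 (by omega)).mpr ⟨hdp, hdq⟩
      · rintro ⟨htr, h2, hm⟩
        rcases Nat.eq_zero_or_pos (Int.gcd p1 q1) with h0 | hpos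
        · rw [h0] at htr
          rw [trialDivs, dif_neg (by norm_num)] at htr
          simp at htr
        have hg1 : 1 ≤ ((Int.gcd p1 q1 : Nat) : Int) := by exact_mod_cast hpos
        obtain ⟨ha1, hdvd⟩ := (trial_mem _ hg1 a).mp htr
        obtain ⟨hdp, hdq⟩ := (dvd_gcd_iff' a p1 q1 (by omega)).mp hdvd
        exact ⟨⟨h2, hm⟩, (PySem.Int.mod_eq_zero_iff_dvd p1 a).mpr hdp,
          (PySem.Int.mod_eq_zero_iff_dvd q1 a).mpr hdq⟩
    · exact List.nodup_reverse.mpr ((PySem.List.nodup_pyRange_one _ _).filter _)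
    · exact (trial_nodup _ 1 [] List.nodup_nil).filter _
  · rw [List.pairwise_reverse]
    exact (PySem.List.pairwise_lt_pyRange_one 2 (max p1 q1)).filter _

theorem redA_eq_revfold (p1 q1 : Int) : redA p1 q1 =
    (((PySem.List.pyRange 2 (max p1 q1) 1).filter
        (fun i => PySem.Int.mod p1 i == 0 && PySem.Int.mod q1 i == 0)).reverse).foldl
      (fun st d => if PySem.Int.mod st.1 d == 0 && PySem.Int.mod st.2 d == 0 then
        (PySem.Int.truncdiv st.1 d, PySem.Int.truncdiv st.2 d) else st) (p1, q1) := by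
  unfold redA
  simp only [PySem.List.foldl_append_if
      (fun i => PySem.Int.mod p1 i == 0 && PySem.Int.mod q1 i == 0)
      (fun i => i), List.map_id', List.nil_append, PySem.List.len_eq]
  exact foldl_rev_index
    ((PySem.List.pyRange 2 (max p1 q1) 1).filter
      (fun i => PySem.Int.mod p1 i == 0 && PySem.Int.mod q1 i == 0)) 0
    (fun st d => if PySem.Int.mod st.1 d == 0 && PySem.Int.mod st.2 d == 0 then
      (PySem.Int.truncdiv st.1 d, PySem.Int.truncdiv st.2 d) else st) (p1, q1)

theorem red_eq (p1 : Int) (q1 : Int) : redA p1 q1 = reduceB p1 q1 := by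
  rw [redA_eq_revfold]
  simp only [reduceB, commonDivsDesc]
  rw [list_eq p1 q1]
  apply PySem.List.foldl_congr_mem
  intro acc x hx
  have h2 : 2 ≤ x := by
    rcases List.mem_reverse.mp hx with hx'
    rcases List.mem_filter.mp hx' with ⟨hmem, -⟩
    exact (PySem.List.mem_pyRange_one.mp hmem).1
  by_cases hc : (PySem.Int.mod acc.1 x == 0 && PySem.Int.mod acc.2 x == 0) = true
  · rw [if_pos hc, if_pos hc]
    obtain ⟨hm1, hm2⟩ := Bool.and_eq_true _ _ |>.mp hc
    have d1 : x ∣ acc.1 := (PySem.Int.mod_eq_zero_iff_dvd _ x).mp (by simpa using hm1)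
    have d2 : x ∣ acc.2 := (PySem.Int.mod_eq_zero_iff_dvd _ x).mp (by simpa using hm2)
    have ht1 : PySem.Int.truncdiv acc.1 x = PySem.Int.floordiv acc.1 x := by
      simp only [PySem.Int.truncdiv]
      rw [Int.tdiv_eq_ediv_of_dvd d1, ← PySem.Int.floordiv_eq_ediv_of_pos (by omega : (0:Int) < x)]
    have ht2 : PySem.Int.truncdiv acc.2 x = PySem.Int.floordiv acc.2 x := by
      simp only [PySem.Int.truncdiv]
      rw [Int.tdiv_eq_ediv_of_dvd d2, ← PySem.Int.floordiv_eq_ediv_of_pos (by omega : (0:Int) < x)]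
    rw [ht1, ht2]
  · rw [if_neg hc, if_neg hc]

theorem revFindJ_none (c : Char) (sq : List Char) (n : Nat)
    (h : revFindJ c sq (PySem.List.pyRange ((n : Int) - 1) (-1) (-1)) = none) :
    ∀ j : Nat, j < n → c ≠ sq.getD j ' ' := by
  induction n with
  | zero => intro j hj; omega
  | succ n ih =>
    rw [show ((n + 1 : Nat) : Int) - 1 = (n : Int) by push_cast; ring,
      PySem.List.pyRange_neg_one_cons (by omega : (-1 : Int) < (n : Int))] at h
    rw [revFindJ, show PySem.List.pyGetD sq ((n : Nat) : Int) ' ' = sq.getD n ' ' from by simp [List.getD]] at h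
    by_cases hc : c = sq.getD n ' '
    · simp [hc] at h
    · rw [if_neg (by simpa using hc)] at h
      intro j hj
      rcases (by omega : j < n ∨ j = n) with hj' | rfl
      · exact ih h j hj'
      · exact hc

theorem revFindJ_some (c : Char) (sq : List Char) (n : Nat) (jI : Int)
    (h : revFindJ c sq (PySem.List.pyRange ((n : Int) - 1) (-1) (-1)) = some jI) :
    ∃ j : Nat, jI = (j : Int) ∧ j < n ∧ c = sq.getD j ' ' ∧
      ∀ j' : Nat, j' < n → j < j' → c ≠ sq.getD j' ' ' := by
  induction n with
  | zero =>
    rw [show ((0 : Nat) : Int) - 1 = -1 by ring,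
      PySem.List.pyRange_neg_one_eq_nil (by omega)] at h
    simp [revFindJ] at h
  | succ n ih =>
    rw [show ((n + 1 : Nat) : Int) - 1 = (n : Int) by push_cast; ring,
      PySem.List.pyRange_neg_one_cons (by omega : (-1 : Int) < (n : Int))] at h
    rw [revFindJ, show PySem.List.pyGetD sq ((n : Nat) : Int) ' ' = sq.getD n ' ' from by simp [List.getD]] at h
    by_cases hc : c = sq.getD n ' '
    · rw [if_pos (by simpa using hc)] at h
      obtain rfl : jI = (n : Int) := by simpa using h.symm
      refine ⟨n, rfl, by omega, hc, ?_⟩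
      intro j' h1 h2; omega
    · rw [if_neg (by simpa using hc)] at h
      obtain ⟨j, rfl, hjn, hcj, hmax⟩ := ih h
      refine ⟨j, rfl, by omega, hcj, ?_⟩
      intro j' h1 h2
      rcases (by omega : j' < n ∨ j' = n) with h3 | rfl
      · exact hmax j' h3 h2
      · exact hc

theorem inner_fold_eq (sp sq : List Char) (i : Int) (n : Nat) (s0 : Bool × Int × Int) :
    (PySem.List.pyRange 0 (n : Int) 1).foldl
      (fun st j =>
        if PySem.List.pyGetD sp i ' ' == PySem.List.pyGetD sq j ' ' then (true, i, j) else st) s0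
    = match revFindJ (PySem.List.pyGetD sp i ' ') sq
        (PySem.List.pyRange ((n : Int) - 1) (-1) (-1)) with
      | some j => (true, i, j)
      | none => s0 := by
  induction n generalizing s0 with
  | zero =>
    rw [show ((0 : Nat) : Int) - 1 = -1 by ring, PySem.List.pyRange_one_eq_nil (by omega),
      PySem.List.pyRange_neg_one_eq_nil (by omega)]
    simp [revFindJ]
  | succ n ih =>
    rw [show ((n + 1 : Nat) : Int) = (n : Int) + 1 by push_cast; ring,
      PySem.List.pyRange_one_succ_right (by omega : (0 : Int) ≤ (n : Int)), List.foldl_append,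
      show ((n : Int) + 1) - 1 = (n : Int) by ring,
      PySem.List.pyRange_neg_one_cons (by omega : (-1 : Int) < (n : Int)), revFindJ,
      show PySem.List.pyGetD sq ((n : Nat) : Int) ' ' = sq.getD n ' ' from by simp [List.getD]]
    simp only [List.foldl_cons, List.foldl_nil]
    by_cases hc : PySem.List.pyGetD sp i ' ' = sq.getD n ' '
    · rw [if_pos (by simpa using hc), if_pos (by simpa using hc)]
    · rw [if_neg (by simpa using hc), if_neg (by simpa using hc)]
      exact ih s0

theorem outer_fold_eq (sp sq : List Char) (n : Nat) :
    (PySem.List.pyRange 0 (n : Int) 1).foldl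
      (fun st i => (PySem.List.pyRange 0 ((sq.length : Int)) 1).foldl
        (fun st j =>
          if PySem.List.pyGetD sp i ' ' == PySem.List.pyGetD sq j ' ' then (true, i, j) else st) st)
      ((false, 0, 0) : Bool × Int × Int)
    = match revScan sp sq (PySem.List.pyRange ((n : Int) - 1) (-1) (-1)) with
      | some (i, j) => (true, i, j)
      | none => (false, 0, 0) := by
  induction n with
  | zero =>
    have h1 : PySem.List.pyRange 0 ((0 : Nat) : Int) 1 = [] := PySem.List.pyRange_one_eq_nil (by omega)
    have h2 : PySem.List.pyRange (((0 : Nat) : Int) - 1) (-1) (-1) = [] :=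
      PySem.List.pyRange_neg_one_eq_nil (by omega)
    rw [h1, h2]
    simp [revScan]
  | succ n ih =>
    have h1 : PySem.List.pyRange 0 ((n + 1 : Nat) : Int) 1
        = PySem.List.pyRange 0 ((n : Nat) : Int) 1 ++ [((n : Nat) : Int)] := by
      rw [show ((n + 1 : Nat) : Int) = (n : Int) + 1 by push_cast; ring]
      exact PySem.List.pyRange_one_succ_right (by omega : (0 : Int) ≤ (n : Int))
    rw [h1, List.foldl_append,
      show ((n + 1 : Nat) : Int) - 1 = (n : Int) by push_cast; ring,
      PySem.List.pyRange_neg_one_cons (by omega : (-1 : Int) < (n : Int)), revScan]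
    simp only [List.foldl_cons, List.foldl_nil, PySem.List.len_eq]
    rw [ih, inner_fold_eq sp sq (n : Int) sq.length]
    cases hf : revFindJ (PySem.List.pyGetD sp (n : Int) ' ') sq
        (PySem.List.pyRange ((sq.length : Int) - 1) (-1) (-1)) with
    | some j => simp
    | none =>
      cases hs : revScan sp sq (PySem.List.pyRange ((n : Int) - 1) (-1) (-1)) <;> simp

theorem revScan_some (sp sq : List Char) (n : Nat) (iI jI : Int)
    (h : revScan sp sq (PySem.List.pyRange ((n : Int) - 1) (-1) (-1)) = some (iI, jI)) :
    ∃ i j : Nat, iI = (i : Int) ∧ jI = (j : Int) ∧ i < n ∧ j < sq.length ∧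
      sp.getD i ' ' = sq.getD j ' ' ∧
      (∀ i' : Nat, i' < n → i < i' → ∀ j' : Nat, j' < sq.length →
        sp.getD i' ' ' ≠ sq.getD j' ' ') ∧
      (∀ j' : Nat, j' < sq.length → j < j' → sp.getD i ' ' ≠ sq.getD j' ' ') := by
  induction n with
  | zero =>
    rw [show ((0 : Nat) : Int) - 1 = -1 by ring,
      PySem.List.pyRange_neg_one_eq_nil (by omega)] at h
    simp [revScan] at h
  | succ n ih =>
    rw [show ((n + 1 : Nat) : Int) - 1 = (n : Int) by push_cast; ring,
      PySem.List.pyRange_neg_one_cons (by omega : (-1 : Int) < (n : Int)), revScan] at h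
    simp only [PySem.List.len_eq] at h
    have hgp : PySem.List.pyGetD sp ((n : Nat) : Int) ' ' = sp.getD n ' ' := by simp [List.getD]
    cases hf : revFindJ (PySem.List.pyGetD sp ((n : Nat) : Int) ' ') sq
        (PySem.List.pyRange ((sq.length : Int) - 1) (-1) (-1)) with
    | some jv =>
      rw [hf] at h
      obtain ⟨h1, h2⟩ : (n : Int) = iI ∧ jv = jI := by simpa using h
      obtain ⟨jn, rfl, hjn, hcj, hmax⟩ := revFindJ_some _ sq sq.length jv hf
      rw [hgp] at hcj hmax
      refine ⟨n, jn, h1.symm, h2.symm, by omega, hjn, hcj, ?_, hmax⟩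
      intro i' hi1 hi2; omega
    | none =>
      rw [hf] at h
      obtain ⟨i, j, rfl, rfl, hin, hj, heq, hmaxi, hmaxj⟩ := ih h
      have hnone := revFindJ_none _ sq sq.length hf
      rw [hgp] at hnone
      refine ⟨i, j, rfl, rfl, by omega, hj, heq, ?_, hmaxj⟩
      intro i' hi1 hi2 j' hj'
      rcases (by omega : i' < n ∨ i' = n) with h3 | rfl
      · exact hmaxi i' h3 hi2 j' hj'
      · exact fun hcc => hnone j' hj' hcc

theorem pair_beq_decide (x y : Int × Int) :
    (if x.1 == y.1 && x.2 == y.2 then true else false) = decide (x = y) := by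
  obtain ⟨x1, x2⟩ := x
  obtain ⟨y1, y2⟩ := y
  by_cases h1 : x1 = y1 <;> by_cases h2 : x2 = y2 <;> simp [h1, h2]

-- ===== VERDICT (by name: the statement is the Claim_ definition above) =====
theorem isCan_spec : Claim_equal_isCan := by
  intro p q hdom hpre
  unfold Spec_isCan
  by_cases hz : (PySem.Int.mod p 10 == 0 && PySem.Int.mod q 10 == 0) = true
  · simp only [isCan, isCan_alt, if_pos hz]
  · simp only [isCan, isCan_alt, if_neg hz, PySem.List.len_eq]
    rw [outer_fold_eq (PySem.Int.toChars p) (PySem.Int.toChars q) ((PySem.Int.toChars p).length)]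
    cases hsc : revScan (PySem.Int.toChars p) (PySem.Int.toChars q)
        (PySem.List.pyRange (((PySem.Int.toChars p).length : Int) - 1) (-1) (-1)) with
    | none => simp
    | some pr =>
      obtain ⟨iI, jI⟩ := pr
      simp only
      obtain ⟨i, j, rfl, rfl, hin, hjn, heq, hmaxi, hmaxj⟩ :=
        revScan_some (PySem.Int.toChars p) (PySem.Int.toChars q) _ iI jI hsc
      rcases hpre with ⟨hp0, hq0⟩ | hlast
      · exact absurd (by rw [hp0, hq0]; rfl) hz
      obtain ⟨hb1, hb2, hs1, hs2⟩ := hlast i hin j hjn ⟨heq, hmaxi, hmaxj⟩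
      have hn : PySem.Int.mod ((i : Int) + 1) 2 = (((i + 1) % 2 : Nat) : Int) := by
        rw [PySem.Int.mod_eq_emod_of_pos (by omega)]; push_cast; omega
      have hm : PySem.Int.mod ((j : Int) + 1) 2 = (((j + 1) % 2 : Nat) : Int) := by
        rw [PySem.Int.mod_eq_emod_of_pos (by omega)]; push_cast; omega
      have hget1 : PySem.List.pyGet? (PySem.Int.toChars p) ((((i + 1) % 2 : Nat)) : Int)
          = some ((PySem.Int.toChars p).getD ((i + 1) % 2) ' ') := by
        rw [PySem.List.pyGet?_natCast, List.getElem?_eq_getElem hb1,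
          List.getD_eq_getElem _ _ hb1]
      have hget2 : PySem.List.pyGet? (PySem.Int.toChars q) ((((j + 1) % 2 : Nat)) : Int)
          = some ((PySem.Int.toChars q).getD ((j + 1) % 2) ' ') := by
        rw [PySem.List.pyGet?_natCast, List.getElem?_eq_getElem hb2,
          List.getD_eq_getElem _ _ hb2]
      obtain ⟨av, hav⟩ := Option.isSome_iff_exists.mp hs1
      obtain ⟨bv, hbv⟩ := Option.isSome_iff_exists.mp hs2
      simp only [hn, hm, hget1, hget2, hav, hbv, red_eq]
      exact pair_beq_decide _ _
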